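-- pv_equiv track=rewrite | github.com/greenstar1151/Baekjoon | 1309_동물원/1309_동물원_250904.py | solution
-- ===== SOURCE A (Python) =====
-- MODULO = 9901
--
-- def solution(N: int):
--     # DP[n][x]: n칸인 동물원에서 마지막 칸의 배치 상태가
--     # x=0: [0, 0] / x=1: [1, 0] / x=2: [0, 1] (0: 없음, 1: 있음)
--     DP = [[0] * 3 for _ in range(N + 1)]
--     DP[1] = [1, 1, 1]
--     for i in range(2, N + 1):
--         DP[i][0] = sum(DP[i - 1]) % MODULO
--         DP[i][1] = (DP[i - 1][0] + DP[i - 1][2]) % MODULO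
--         DP[i][2] = (DP[i - 1][0] + DP[i - 1][1]) % MODULO
--
--     return sum(DP[N]) % MODULO
-- ===== SOURCE B (Python) =====
-- MODULO = 9901
--
-- def solution(N: int):
--     # Matrix exponentiation of the 3x3 linear recurrence, O(log N) instead of O(N).
--     # Matrices are flat 9-tuples (row-major); answer = sum of all entries of M^(N-1) mod 9901.
--     if N < 1:
--         raise ValueError("N must be a positive zoo size")
--     def mul(X, Y):
--         a, b, c, d, e, f, g, h, i = X
--         j, k, l, m, n, o, p, q, r = Y
--         return ((a*j + b*m + c*p) % MODULO, (a*k + b*n + c*q) % MODULO, (a*l + b*o + c*r) % MODULO,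
--                 (d*j + e*m + f*p) % MODULO, (d*k + e*n + f*q) % MODULO, (d*l + e*o + f*r) % MODULO,
--                 (g*j + h*m + i*p) % MODULO, (g*k + h*n + i*q) % MODULO, (g*l + h*o + i*r) % MODULO)
--     M = (1, 1, 1, 1, 0, 1, 1, 1, 0)
--     R = (1, 0, 0, 0, 1, 0, 0, 0, 1)
--     e = N - 1
--     while e > 0:
--         if e & 1:
--             R = mul(R, M)
--         M = mul(M, M)
--         e >>= 1
--     return sum(R) % MODULO
-- ===== Notes on version B (the rewrite author's own statement) =====
-- stated objective: faster
-- what changed: Replaced the linear DP table over all N rows by fast exponentiation (repeated squaring) of the 3x3 transition matrix mod 9901, summing the entries of M^(N-1).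
import Mathlib
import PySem

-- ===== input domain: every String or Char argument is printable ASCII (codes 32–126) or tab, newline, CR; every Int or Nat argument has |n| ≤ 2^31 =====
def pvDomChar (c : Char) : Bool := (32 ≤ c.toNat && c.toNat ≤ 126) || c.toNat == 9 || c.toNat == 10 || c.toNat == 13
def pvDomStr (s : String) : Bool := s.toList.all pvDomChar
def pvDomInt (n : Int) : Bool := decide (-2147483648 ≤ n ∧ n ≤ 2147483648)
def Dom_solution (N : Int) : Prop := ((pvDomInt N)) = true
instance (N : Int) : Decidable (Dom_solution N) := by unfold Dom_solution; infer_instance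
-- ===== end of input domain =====

-- B replaces A's O(N) DP table by fast exponentiation of the 3x3 transition matrix mod 9901 (O(log N)); both raise on N ≤ 0 (outside Pre_).


-- ===== PORT A =====
-- one iteration of A's 'for i' loop: three in-place element assignments DP[i][0..2]
def stepA (DP : List (List Int)) (i : Int) : List (List Int) :=
  let DP1 := PySem.List.pySetD DP i
      (PySem.List.pySetD (PySem.List.pyGetD DP i []) 0
        (PySem.Int.mod (PySem.List.pyGetD DP (i - 1) []).sum 9901))
  let DP2 := PySem.List.pySetD DP1 i
      (PySem.List.pySetD (PySem.List.pyGetD DP1 i []) 1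
        (PySem.Int.mod (PySem.List.pyGetD (PySem.List.pyGetD DP1 (i - 1) []) 0 0
            + PySem.List.pyGetD (PySem.List.pyGetD DP1 (i - 1) []) 2 0) 9901))
  PySem.List.pySetD DP2 i
      (PySem.List.pySetD (PySem.List.pyGetD DP2 i []) 2
        (PySem.Int.mod (PySem.List.pyGetD (PySem.List.pyGetD DP2 (i - 1) []) 0 0
            + PySem.List.pyGetD (PySem.List.pyGetD DP2 (i - 1) []) 1 0) 9901))

def solution (N : Int) : Int :=
  let DP0 : List (List Int) := (PySem.List.pyRange 0 (N + 1) 1).map (fun _ => [0, 0, 0])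
  let DP1 := PySem.List.pySetD DP0 1 [1, 1, 1]
  let DP2 := (PySem.List.pyRange 2 (N + 1) 1).foldl stepA DP1
  PySem.Int.mod (PySem.List.pyGetD DP2 N []).sum 9901

-- ===== PORT B =====
-- a 3x3 matrix as a flat row-major 9-tuple, as in Source B
abbrev M3 := Int × Int × Int × Int × Int × Int × Int × Int × Int

def mulB (X Y : M3) : M3 :=
  match X, Y with
  | (a, b, c, d, e, f, g, h, i), (j, k, l, m, n, o, p, q, r) =>
    (PySem.Int.mod (a*j + b*m + c*p) 9901, PySem.Int.mod (a*k + b*n + c*q) 9901, PySem.Int.mod (a*l + b*o + c*r) 9901,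
     PySem.Int.mod (d*j + e*m + f*p) 9901, PySem.Int.mod (d*k + e*n + f*q) 9901, PySem.Int.mod (d*l + e*o + f*r) 9901,
     PySem.Int.mod (g*j + h*m + i*p) 9901, PySem.Int.mod (g*k + h*n + i*q) 9901, PySem.Int.mod (g*l + h*o + i*r) 9901)

-- Source B's 'while e > 0' square-and-multiply loop (e = N-1 ≥ 0 inside Pre_; .toNat is exact there)
def powLoop (R M : M3) (e : Nat) : M3 :=
  if h : 0 < e then
    powLoop (if e % 2 = 1 then mulB R M else R) (mulB M M) (e / 2)
  else R
termination_by e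
decreasing_by exact Nat.div_lt_self h (by norm_num)

def sumM3 (X : M3) : Int :=
  match X with
  | (a, b, c, d, e, f, g, h, i) => a + b + c + d + e + f + g + h + i

-- Source B raises ValueError for N < 1 before this computation; those inputs lie outside Pre_solution
def solution_alt (N : Int) : Int :=
  let M : M3 := (1, 1, 1, 1, 0, 1, 1, 1, 0)
  let R : M3 := (1, 0, 0, 0, 1, 0, 0, 0, 1)
  let R' := powLoop R M (N - 1).toNat
  PySem.Int.mod (sumM3 R') 9901

-- ===== PRECONDITION & SPEC =====
-- Pre_ excludes only N ≤ 0: there A raises IndexError (DP[1] = [1,1,1] is out of range) and B raises ValueError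
def Pre_solution (N : Int) : Prop := 1 ≤ N
instance (N : Int) : Decidable (Pre_solution N) := by unfold Pre_solution; infer_instance
def pvWitness_solution : Int := 5

def Spec_solution (N : Int) (out : Int) : Prop := out = solution_alt N
instance (N : Int) (out : Int) : Decidable (Spec_solution N out) := by unfold Spec_solution; infer_instance

-- ===== CLAIM (what is proved, stated in full; the proofs are below) =====
def Claim_equal_solution : Prop := ∀ (N : Int), Dom_solution N → Pre_solution N → Spec_solution N (solution N)

-- ===== LEMMAS AND PROOFS =====

-- the reference recurrence: tA n = A's row DP[n+1] (componentwise, already reduced mod 9901 for n ≥ 1)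
def tA : Nat → Int × Int × Int
  | 0 => (1, 1, 1)
  | n + 1 =>
    let t := tA n
    (PySem.Int.mod (t.1 + t.2.1 + t.2.2) 9901,
     PySem.Int.mod (t.1 + t.2.2) 9901,
     PySem.Int.mod (t.1 + t.2.1) 9901)

-- interpretation of a flat 9-tuple as a matrix over ZMod 9901
def phi (X : M3) : Matrix (Fin 3) (Fin 3) (ZMod 9901) :=
  match X with
  | (a, b, c, d, e, f, g, h, i) =>
    !![(a : ZMod 9901), b, c; d, e, f; g, h, i]

def Mc : M3 := (1, 1, 1, 1, 0, 1, 1, 1, 0)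
def Ic : M3 := (1, 0, 0, 0, 1, 0, 0, 0, 1)

lemma castMod (x : Int) : ((PySem.Int.mod x 9901 : Int) : ZMod 9901) = (x : ZMod 9901) := by
  rw [PySem.Int.mod_eq_emod_of_pos (by norm_num)]
  exact_mod_cast ZMod.intCast_mod x 9901

set_option maxHeartbeats 1600000 in
lemma phi_mul (X Y : M3) : phi (mulB X Y) = phi X * phi Y := by
  obtain ⟨a, b, c, d, e, f, g, h, i⟩ := X
  obtain ⟨j, k, l, m, n, o, p, q, r⟩ := Y
  ext x y
  fin_cases x <;> fin_cases y <;>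
    · simp only [mulB, phi, Matrix.mul_apply, Fin.sum_univ_three]
      simp only [Matrix.of_apply, Matrix.cons_val', Matrix.cons_val_zero, Matrix.cons_val_one,
        Matrix.head_cons, Matrix.empty_val', Matrix.cons_val_fin_one, Matrix.head_fin_const,
        Matrix.cons_val_two, Matrix.tail_cons]
      push_cast [castMod]
      ring

lemma phi_Ic : phi Ic = 1 := by
  simp only [phi, Ic]
  ext i j
  fin_cases i <;> fin_cases j <;> simp

lemma powLoop_phi (R M : M3) (e : Nat) : phi (powLoop R M e) = phi R * (phi M) ^ e := by
  induction R, M, e using powLoop.induct with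
  | case2 R M e h => simp [powLoop, Nat.not_lt.mp h |> Nat.le_zero.mp]  -- e = 0
  | case1 R M e h ih =>
    rw [powLoop]
    simp only [dif_pos h]
    simp only [dite_eq_ite] at ih
    rw [ih]
    by_cases hodd : e % 2 = 1
    · simp only [if_pos hodd, phi_mul]
      rw [mul_assoc, ← pow_two, ← pow_mul, ← pow_succ']
      congr 2
      omega
    · simp only [if_neg hodd, phi_mul]
      rw [← pow_two, ← pow_mul]
      congr 2
      omega

lemma sumM3_cast (X : M3) : ((sumM3 X : Int) : ZMod 9901) = ∑ i, ∑ j, phi X i j := by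
  obtain ⟨a, b, c, d, e, f, g, h, i⟩ := X
  simp [sumM3, phi, Fin.sum_univ_three]
  ring_nf

-- row sums of (phi Mc)^n are exactly the casts of tA n
lemma tA_cast (n : Nat) :
    (((tA n).1 : Int) : ZMod 9901) = ∑ j, ((phi Mc) ^ n) 0 j ∧
    (((tA n).2.1 : Int) : ZMod 9901) = ∑ j, ((phi Mc) ^ n) 1 j ∧
    (((tA n).2.2 : Int) : ZMod 9901) = ∑ j, ((phi Mc) ^ n) 2 j := by
  induction n with
  | zero => simp [tA, Fin.sum_univ_three]
  | succ n ih =>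
    obtain ⟨h0, h1, h2⟩ := ih
    rw [pow_succ']
    refine ⟨?_, ?_, ?_⟩
    · simp only [tA]; push_cast [castMod]
      simp only [Matrix.mul_apply, Fin.sum_univ_three, phi, Mc] at h0 h1 h2 ⊢
      simp at h0 h1 h2 ⊢
      linear_combination h0 + h1 + h2
    · simp only [tA]; push_cast [castMod]
      simp only [Matrix.mul_apply, Fin.sum_univ_three, phi, Mc] at h0 h1 h2 ⊢
      simp at h0 h1 h2 ⊢
      linear_combination h0 + h2
    · simp only [tA]; push_cast [castMod]
      simp only [Matrix.mul_apply, Fin.sum_univ_three, phi, Mc] at h0 h1 h2 ⊢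
      simp at h0 h1 h2 ⊢
      linear_combination h0 + h1

lemma row3 (r : List Int) (h : r.length = 3) : ∃ x y z : Int, r = [x, y, z] := by
  match r, h with
  | [x, y, z], _ => exact ⟨x, y, z, rfl⟩

-- one loop iteration rewrites row i of the table from row i-1
lemma stepA_eq (S : List (List Int)) (i : Nat) (a b c x y z : Int)
    (h2 : 2 ≤ i) (hi : i < S.length)
    (hrow : S[i]? = some [x, y, z]) (hprev : S[i - 1]? = some [a, b, c]) :
    stepA S (i : Int) =
      S.set i [PySem.Int.mod (a + b + c) 9901, PySem.Int.mod (a + c) 9901,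
        PySem.Int.mod (a + b) 9901] := by
  have hip : ((i : Int) - 1) = ((i - 1 : Nat) : Int) := by omega
  have hne : i ≠ i - 1 := by omega
  unfold stepA
  simp only [hip, PySem.List.pyGetD_natCast, PySem.List.pySetD_natCast,
    List.getD_eq_getElem?_getD, hrow, hprev, Option.getD_some,
    List.getElem?_set, List.length_set, if_neg hne, if_pos hi]
  simp [PySem.List.pySetD, PySem.List.pySet?, PySem.List.pyIdx?, PySem.List.pyGetD,
    PySem.List.pyGet?, List.set_set]
  ring_nf

-- invariant of A's fold: every row has length 3, the length is preserved, and row j holds tA (j-1)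
lemma foldA_inv (L : Nat) (DP : List (List Int)) (hlen : DP.length = L)
    (hrows : ∀ r ∈ DP, r.length = 3) (h1 : DP[1]? = some [(tA 0).1, (tA 0).2.1, (tA 0).2.2])
    (j : Nat) (h1j : 1 ≤ j) (hjL : j < L) :
    let S := (PySem.List.pyRange 2 ((j : Int) + 1) 1).foldl stepA DP
    S.length = L ∧ (∀ r ∈ S, r.length = 3) ∧
      S[j]? = some [(tA (j - 1)).1, (tA (j - 1)).2.1, (tA (j - 1)).2.2] := by
  induction j, h1j using Nat.le_induction with
  | base =>
    rw [show ((1 : Nat) : Int) + 1 = 2 by norm_num, PySem.List.pyRange_one_eq_nil (by norm_num)]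
    exact ⟨hlen, hrows, h1⟩
  | succ j hj ih =>
    have hjL' : j < L := by omega
    obtain ⟨Slen, Srows, Sj⟩ := ih hjL'
    set S := (PySem.List.pyRange 2 ((j : Int) + 1) 1).foldl stepA DP with hS
    have hcast : (((j + 1 : Nat) : Int) + 1) = ((j : Int) + 1) + 1 := by push_cast; ring
    have hrange : PySem.List.pyRange 2 (((j + 1 : Nat) : Int) + 1) 1
        = PySem.List.pyRange 2 ((j : Int) + 1) 1 ++ [(j : Int) + 1] := by
      rw [hcast, PySem.List.pyRange_one_succ_right (by omega)]
    rw [hrange, List.foldl_append]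
    simp only [List.foldl_cons, List.foldl_nil, ← hS]
    -- the current content of row j+1 (still untouched, length 3)
    have hj1 : j + 1 < S.length := by omega
    obtain ⟨r, hr⟩ : ∃ r, S[j + 1]? = some r := ⟨S[j + 1]'hj1, List.getElem?_eq_getElem hj1⟩
    have hrmem : r ∈ S := List.mem_of_getElem? hr
    obtain ⟨x, y, z, rfl⟩ := row3 r (Srows r hrmem)
    have hidx : ((j : Int) + 1) = (((j + 1 : Nat)) : Int) := by push_cast; ring
    have hprev : S[(j + 1) - 1]? = some [(tA (j - 1)).1, (tA (j - 1)).2.1, (tA (j - 1)).2.2] := by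
      simpa using Sj
    rw [hidx, stepA_eq S (j + 1) _ _ _ x y z (by omega) hj1 hr hprev]
    refine ⟨by simpa using Slen, ?_, ?_⟩
    · intro r hrmem'
      rcases List.mem_or_eq_of_mem_set hrmem' with h | h
      · exact Srows r h
      · subst h; rfl
    · rw [List.getElem?_set_self (by omega)]
      have hj' : (j + 1) - 1 = (j - 1) + 1 := by omega
      rw [hj']
      simp [tA]

lemma castFinal (X Y : Int) (h : (X : ZMod 9901) = (Y : ZMod 9901)) :
    PySem.Int.mod X 9901 = PySem.Int.mod Y 9901 := by
  rw [PySem.Int.mod_eq_emod_of_pos (by norm_num), PySem.Int.mod_eq_emod_of_pos (by norm_num)]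
  have := (ZMod.intCast_eq_intCast_iff' X Y 9901).mp h
  exact_mod_cast this

-- ===== VERDICT (by name: the statement is the Claim_ definition above) =====
theorem solution_spec : Claim_equal_solution := by
  intro N _ hN
  unfold Pre_solution at hN
  unfold Spec_solution
  set n := N.toNat with hn
  have hNn : N = (n : Int) := by omega
  have hn1 : 1 ≤ n := by omega
  simp only [solution, solution_alt]
  rw [hNn]
  set DP0 := (PySem.List.pyRange 0 ((n : Int) + 1) 1).map (fun _ => ([0, 0, 0] : List Int)) with hDP0
  have hlen0 : DP0.length = n + 1 := by
    rw [hDP0, List.length_map, PySem.List.length_pyRange_one]; omega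
  set DP1 := PySem.List.pySetD DP0 1 [(1 : Int), 1, 1] with hDP1
  have hDP1' : DP1 = DP0.set 1 [1, 1, 1] := by
    rw [hDP1, PySem.List.pySetD_of_nonneg]; · rfl
    · norm_num
  have hlen1 : DP1.length = n + 1 := by rw [hDP1', List.length_set]; exact hlen0
  have hrows1 : ∀ r ∈ DP1, r.length = 3 := by
    intro r hr
    rw [hDP1'] at hr
    rcases List.mem_or_eq_of_mem_set hr with h | h
    · rw [hDP0] at h; obtain ⟨_, _, rfl⟩ := List.mem_map.mp h; rfl
    · subst h; rfl
  have h11 : DP1[1]? = some [(tA 0).1, (tA 0).2.1, (tA 0).2.2] := by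
    rw [hDP1', List.getElem?_set_self (by omega)]; rfl
  obtain ⟨Slen, Srows, Sn⟩ := foldA_inv (n + 1) DP1 hlen1 hrows1 h11 n hn1 (by omega)
  rw [PySem.List.pyGetD_natCast, List.getD_eq_getElem?_getD, Sn]
  rw [show (((n : Int)) - 1).toNat = n - 1 by omega]
  rw [show ((1, 1, 1, 1, 0, 1, 1, 1, 0) : M3) = Mc from rfl,
      show ((1, 0, 0, 0, 1, 0, 0, 0, 1) : M3) = Ic from rfl]
  apply castFinal
  obtain ⟨c0, c1, c2⟩ := tA_cast (n - 1)
  have hB : ((sumM3 (powLoop Ic Mc (n - 1)) : Int) : ZMod 9901)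
      = ∑ i, ∑ j, ((phi Mc) ^ (n - 1)) i j := by
    rw [sumM3_cast, powLoop_phi, phi_Ic, one_mul]
  rw [hB]
  simp only [Option.getD_some, List.sum_cons, List.sum_nil]
  rw [add_zero]
  push_cast
  rw [c0, c1, c2]
  simp only [Fin.sum_univ_three]
  ring
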